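-- pv_equiv track=rewrite | github.com/Mastermindmani88897/Coding_platforms | Difficulty: Medium/Range LCM Queries/range-lcm-queries.py | RangeLCMQuery
-- ===== SOURCE A (Python) =====
-- from math import gcd
--
-- def RangeLCMQuery(arr, queries):
--
--     n = len(arr)
--
--     def lcm(a, b):
--         return (a * b) // gcd(a, b)
--
--     seg = [1] * (4 * n)
--
--     def build(node, start, end):
--         if start == end:
--             seg[node] = arr[start]
--             return
--
--         mid = (start + end) // 2
--
--         build(2 * node, start, mid)
--         build(2 * node + 1, mid + 1, end)
--
--         seg[node] = lcm(seg[2 * node], seg[2 * node + 1])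
--
--     def update(node, start, end, idx, val):
--         if start == end:
--             seg[node] = val
--             return
--
--         mid = (start + end) // 2
--
--         if idx <= mid:
--             update(2 * node, start, mid, idx, val)
--         else:
--             update(2 * node + 1, mid + 1, end, idx, val)
--
--         seg[node] = lcm(seg[2 * node], seg[2 * node + 1])
--
--     def query(node, start, end, l, r):
--         if r < start or end < l:
--             return 1
--
--         if l <= start and end <= r:
--             return seg[node]
--
--         mid = (start + end) // 2
--
--         left = query(2 * node, start, mid, l, r)
--         right = query(2 * node + 1, mid + 1, end, l, r)
--
--         return lcm(left, right)
--
--     build(1, 0, n - 1)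
--
--     ans = []
--
--     for q in queries:
--
--         if q[0] == 1:
--             _, idx, val = q
--             update(1, 0, n - 1, idx, val)
--
--         else:
--             _, l, r = q
--             ans.append(query(1, 0, n - 1, l, r))
--
--     return ans
-- ===== SOURCE B (Python) =====
-- from math import gcd
--
-- def RangeLCMQuery(arr, queries):
--     # Simpler: no segment tree; keep a plain list, update by assignment,
--     # answer a query by folding lcm over the clipped index range.
--     n = len(arr)
--     a = list(arr)
--     out = []
--     for t, x, y in queries:
--         if t == 1:
--             a[x] = y
--         else:
--             acc = 1
--             for i in range(max(x, 0), min(y, n - 1) + 1):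
--                 acc = acc * a[i] // gcd(acc, a[i])
--             out.append(acc)
--     return out
-- ===== Notes on version B (the rewrite author's own statement) =====
-- stated objective: simpler
-- what changed: Replaces the recursive segment tree (build/update/query over a 4n node array) with a plain list: an update is a direct assignment and a range query folds lcm over the clipped index range, which is correct because Python's a*b//gcd(a,b) is associative and commutative with identity 1.
-- outside the precondition, e.g. on RangeLCMQuery([2, 3], [[1, -1, 5], [2, 0, 0]]): A returns [5], B returns [2]; on RangeLCMQuery([2, 3], [[1, 5, 7], [2, 0, 1]]): A returns [14], B raises IndexError; on RangeLCMQuery([0, 5], [[1, 0, 0], [2, 0, 1]]): A returns [0], B returns [0]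
import Mathlib
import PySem

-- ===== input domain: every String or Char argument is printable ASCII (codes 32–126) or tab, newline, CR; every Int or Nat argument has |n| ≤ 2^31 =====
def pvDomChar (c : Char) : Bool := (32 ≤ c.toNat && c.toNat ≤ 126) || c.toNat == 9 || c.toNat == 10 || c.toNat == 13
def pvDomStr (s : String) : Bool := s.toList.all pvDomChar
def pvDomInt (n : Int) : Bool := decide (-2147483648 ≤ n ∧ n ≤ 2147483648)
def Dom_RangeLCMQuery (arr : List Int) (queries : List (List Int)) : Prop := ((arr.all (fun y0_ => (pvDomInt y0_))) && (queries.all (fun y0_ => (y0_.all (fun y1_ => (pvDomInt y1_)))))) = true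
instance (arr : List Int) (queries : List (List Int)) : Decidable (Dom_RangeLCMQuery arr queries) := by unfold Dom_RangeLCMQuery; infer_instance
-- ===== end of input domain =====

-- B replaces A's recursive segment tree by a plain list (assignment + a single lcm fold per query): simpler, same results.

-- ===== PORT A =====
-- A's local helper lcm(a, b) = (a * b) // gcd(a, b)
def pylcmA (a b : Int) : Int := PySem.Int.floordiv (a * b) (Int.gcd a b)

-- seg is the mutable int array `seg`; one point assignment seg[k] = v
def segSet (seg : Nat → Int) (k : Nat) (v : Int) : Nat → Int :=
  fun j => if j = k then v else seg j

-- A's `build` (fuel bounds the recursion depth; A diverges on empty arr, excluded by Pre_)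
def buildA (arr : List Int) : Nat → Nat → Int → Int → (Nat → Int) → (Nat → Int)
  | 0, _, _, _, seg => seg
  | fuel + 1, node, s, e, seg =>
    if s = e then segSet seg node (PySem.List.pyGetD arr s 0)
    else
      let mid := PySem.Int.floordiv (s + e) 2
      let seg1 := buildA arr fuel (2 * node) s mid seg
      let seg2 := buildA arr fuel (2 * node + 1) (mid + 1) e seg1
      segSet seg2 node (pylcmA (seg2 (2 * node)) (seg2 (2 * node + 1)))

-- A's `update`
def updateA : Nat → Nat → Int → Int → Int → Int → (Nat → Int) → (Nat → Int)
  | 0, _, _, _, _, _, seg => seg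
  | fuel + 1, node, s, e, idx, val, seg =>
    if s = e then segSet seg node val
    else
      let mid := PySem.Int.floordiv (s + e) 2
      let seg' :=
        if idx ≤ mid then updateA fuel (2 * node) s mid idx val seg
        else updateA fuel (2 * node + 1) (mid + 1) e idx val seg
      segSet seg' node (pylcmA (seg' (2 * node)) (seg' (2 * node + 1)))

-- A's `query`
def queryA : Nat → Nat → Int → Int → Int → Int → (Nat → Int) → Int
  | 0, _, _, _, _, _, _ => 1
  | fuel + 1, node, s, e, l, r, seg =>
    if r < s ∨ e < l then 1
    else if l ≤ s ∧ e ≤ r then seg node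
    else
      let mid := PySem.Int.floordiv (s + e) 2
      pylcmA (queryA fuel (2 * node) s mid l r seg) (queryA fuel (2 * node + 1) (mid + 1) e l r seg)

def RangeLCMQuery (arr : List Int) (queries : List (List Int)) : List Int :=
  let n : Int := arr.length
  let fuel := arr.length + 1
  let seg0 : Nat → Int := fun _ => 1
  let seg := buildA arr fuel 1 0 (n - 1) seg0
  (queries.foldl
    (fun st q =>
      if PySem.List.pyGetD q 0 0 = 1 then
        (updateA fuel 1 0 (n - 1) (PySem.List.pyGetD q 1 0) (PySem.List.pyGetD q 2 0) st.1, st.2)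
      else
        (st.1, st.2 ++ [queryA fuel 1 0 (n - 1) (PySem.List.pyGetD q 1 0) (PySem.List.pyGetD q 2 0) st.1]))
    (seg, ([] : List Int))).2

-- ===== PORT B =====
def RangeLCMQuery_alt (arr : List Int) (queries : List (List Int)) : List Int :=
  let n : Int := arr.length
  (queries.foldl
    (fun (st : List Int × List Int) q =>
      let t := PySem.List.pyGetD q 0 0
      let x := PySem.List.pyGetD q 1 0
      let y := PySem.List.pyGetD q 2 0
      if t = 1 then (st.1.set x.toNat y, st.2)
      else
        (st.1, st.2 ++
          [(PySem.List.pyRange (max x 0) (min y (n - 1) + 1) 1).foldl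
            (fun acc i =>
              PySem.Int.floordiv (acc * PySem.List.pyGetD st.1 i 0)
                (Int.gcd acc (PySem.List.pyGetD st.1 i 0))) 1]))
    (arr, ([] : List Int))).2

-- ===== PRECONDITION & SPEC =====
-- Pre_ excludes: (a) the empty array, on which A recurses forever (RecursionError); (b) queries not of
-- length 3, on which A raises IndexError/ValueError; (c) update indices outside [0, n), a corner nobody
-- would specify, where A silently redirects the write to an end leaf while B's plain list indexing raises
-- IndexError (idx ≥ n or idx < -n) or wraps around (negative idx); (d) inputs carrying more than one zero
-- among the initial array and the update values, on which A may raise ZeroDivisionError in gcd(0, 0)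
-- (single-element arrays never combine two values, so they are admitted regardless of zeros).
def Pre_RangeLCMQuery (arr : List Int) (queries : List (List Int)) : Prop :=
  arr ≠ [] ∧
  (∀ q ∈ queries, q.length = 3 ∧
    (PySem.List.pyGetD q 0 0 = 1 →
      0 ≤ PySem.List.pyGetD q 1 0 ∧ PySem.List.pyGetD q 1 0 < (arr.length : Int))) ∧
  (arr.length = 1 ∨
    arr.countP (fun v => v = 0) +
      queries.countP (fun q => PySem.List.pyGetD q 0 0 = 1 ∧ PySem.List.pyGetD q 2 0 = 0) ≤ 1)
instance (arr : List Int) (queries : List (List Int)) : Decidable (Pre_RangeLCMQuery arr queries) := by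
  unfold Pre_RangeLCMQuery; infer_instance

def pvWitness_RangeLCMQuery : List Int × List (List Int) := ([2, 3], [[1, 0, 6], [2, 0, 1]])

def Spec_RangeLCMQuery (arr : List Int) (queries : List (List Int)) (out : List Int) : Prop := out = RangeLCMQuery_alt arr queries
instance (arr : List Int) (queries : List (List Int)) (out : List Int) : Decidable (Spec_RangeLCMQuery arr queries out) := by unfold Spec_RangeLCMQuery; infer_instance

-- ===== CLAIM (what is proved, stated in full; the proofs are below) =====
def Claim_equal_RangeLCMQuery : Prop := ∀ (arr : List Int) (queries : List (List Int)), Dom_RangeLCMQuery arr queries → Pre_RangeLCMQuery arr queries → Spec_RangeLCMQuery arr queries (RangeLCMQuery arr queries)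

-- ===== LEMMAS AND PROOFS =====

-- element read a[i] (i ≥ 0 wherever used)
def gA (a : List Int) (i : Int) : Int := PySem.List.pyGetD a i 0

-- lcm-fold over indices lo..hi of a — exactly B's per-query loop
def Lf (a : List Int) (lo hi : Int) : Int :=
  (PySem.List.pyRange lo (hi + 1) 1).foldl (fun acc i => pylcmA acc (gA a i)) 1

-- heap-descendant relation: m lies in the subtree rooted at p
def desc (p m : Nat) : Prop := ∃ k, m / 2 ^ k = p

-- the (node, s, e) triples the recursions of A visit, starting from (n, s, e)
inductive Cov : Nat → Int → Int → Nat → Int → Int → Prop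
  | refl (n : Nat) (s e : Int) : Cov n s e n s e
  | left {n : Nat} {s e : Int} {m : Nat} {s' e' : Int} (h : s ≠ e)
      (hc : Cov (2 * n) s (PySem.Int.floordiv (s + e) 2) m s' e') : Cov n s e m s' e'
  | right {n : Nat} {s e : Int} {m : Nat} {s' e' : Int} (h : s ≠ e)
      (hc : Cov (2 * n + 1) (PySem.Int.floordiv (s + e) 2 + 1) e m s' e') : Cov n s e m s' e'

theorem pylcm_eq (a b : Int) : pylcmA a b = a.sign * b.sign * (Int.lcm a b : Int) := by
  unfold pylcmA
  by_cases ha : a = 0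
  · subst ha
    by_cases hb : b = 0
    · subst hb; decide
    · have hg : (0:Int) < Int.gcd 0 b := by
        have : Int.gcd 0 b ≠ 0 := by simp [hb]
        exact_mod_cast Nat.pos_of_ne_zero this
      rw [show (0:Int) * b = 0 * (Int.gcd 0 b : Int) by ring,
        PySem.Int.floordiv_eq_ediv_of_pos hg]
      simp
  · by_cases hb : b = 0
    · subst hb
      have hg : (0:Int) < Int.gcd a 0 := by
        have : Int.gcd a 0 ≠ 0 := by simp [ha]
        exact_mod_cast Nat.pos_of_ne_zero this
      rw [show a * (0:Int) = 0 * (Int.gcd a 0 : Int) by ring,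
        PySem.Int.floordiv_eq_ediv_of_pos hg]
      simp
    · have hg : (0:Int) < Int.gcd a b := by
        have : Int.gcd a b ≠ 0 := by simp [Int.gcd_eq_zero_iff, ha, hb]
        exact_mod_cast Nat.pos_of_ne_zero this
      have h3 : ((Int.lcm a b : Int)) * (Int.gcd a b : Int) = (a.natAbs : Int) * b.natAbs := by
        exact_mod_cast congrArg (Nat.cast : Nat → Int) (Nat.lcm_mul_gcd a.natAbs b.natAbs)
      have key : a * b = (a.sign * b.sign * (Int.lcm a b : Int)) * (Int.gcd a b : Int) := by
        calc a * b = (a.sign * a.natAbs) * (b.sign * b.natAbs) := by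
              rw [Int.sign_mul_natAbs, Int.sign_mul_natAbs]
          _ = (a.sign * b.sign) * ((a.natAbs : Int) * b.natAbs) := by ring
          _ = (a.sign * b.sign) * ((Int.lcm a b : Int) * Int.gcd a b) := by rw [h3]
          _ = _ := by ring
      rw [key, PySem.Int.floordiv_eq_ediv_of_pos hg, Int.mul_ediv_cancel _ (by omega)]

theorem pylcm_one_left (a : Int) : pylcmA 1 a = a := by
  unfold pylcmA
  rw [Int.gcd_one_left, show ((1:Nat):Int) = 1 by norm_num,
    PySem.Int.floordiv_eq_ediv_of_pos one_pos]
  simp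

theorem pylcm_one_right (a : Int) : pylcmA a 1 = a := by
  unfold pylcmA
  rw [Int.gcd_one_right, show ((1:Nat):Int) = 1 by norm_num,
    PySem.Int.floordiv_eq_ediv_of_pos one_pos]
  simp

theorem pylcm_assoc (a b c : Int) : pylcmA (pylcmA a b) c = pylcmA a (pylcmA b c) := by
  by_cases ha : a = 0
  · subst ha; simp [pylcm_eq]
  by_cases hb : b = 0
  · subst hb; simp [pylcm_eq]
  by_cases hc : c = 0
  · subst hc; simp [pylcm_eq]
  have key : ∀ x y : Int, x ≠ 0 → y ≠ 0 →
      (x.sign * y.sign * (Int.lcm x y : Int)).sign = x.sign * y.sign ∧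
      (x.sign * y.sign * (Int.lcm x y : Int)).natAbs = Int.lcm x y := by
    intro x y hx hy
    have hl : Int.lcm x y ≠ 0 := by simp [Int.lcm_eq_zero_iff, hx, hy]
    have hlp : (0:Int) < (Int.lcm x y : Int) := by exact_mod_cast Nat.pos_of_ne_zero hl
    constructor
    · rw [Int.sign_mul, Int.sign_mul, Int.sign_sign, Int.sign_sign,
        Int.sign_eq_one_of_pos hlp, mul_one]
    · rw [Int.natAbs_mul, Int.natAbs_mul, Int.natAbs_sign_of_ne_zero hx,
        Int.natAbs_sign_of_ne_zero hy, Int.natAbs_natCast, one_mul, one_mul]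
  have hab := key a b ha hb
  have hbc := key b c hb hc
  rw [pylcm_eq a b, pylcm_eq b c, pylcm_eq, pylcm_eq, hab.1, hbc.1]
  simp only [Int.lcm] at hab hbc ⊢
  rw [hab.2, hbc.2, Nat.lcm_assoc]
  ring

theorem mid_bounds {s e : Int} (h : s < e) :
    s ≤ PySem.Int.floordiv (s + e) 2 ∧ PySem.Int.floordiv (s + e) 2 < e := by
  rw [PySem.Int.floordiv_eq_ediv_of_pos (by norm_num : (0:Int) < 2)]
  omega

theorem foldl_hoist (a : List Int) (ys : List Int) (init : Int) :
    ys.foldl (fun acc i => pylcmA acc (gA a i)) init =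
      pylcmA init (ys.foldl (fun acc i => pylcmA acc (gA a i)) 1) := by
  induction ys generalizing init with
  | nil => simp [pylcm_one_right]
  | cons y ys ih =>
    simp only [List.foldl_cons]
    rw [ih (pylcmA init (gA a y)), ih (pylcmA 1 (gA a y)), pylcm_one_left, pylcm_assoc]

theorem Lf_empty (a : List Int) {lo hi : Int} (h : hi < lo) : Lf a lo hi = 1 := by
  unfold Lf
  rw [PySem.List.pyRange_one_eq_nil (by omega)]
  rfl

theorem Lf_single (a : List Int) (i : Int) : Lf a i i = gA a i := by
  unfold Lf
  rw [PySem.List.pyRange_one_singleton]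
  simp [pylcm_one_left]

theorem Lf_split (a : List Int) {lo mid hi : Int} (h1 : lo ≤ mid + 1) (h2 : mid ≤ hi) :
    Lf a lo hi = pylcmA (Lf a lo mid) (Lf a (mid + 1) hi) := by
  unfold Lf
  rw [PySem.List.pyRange_one_append lo (mid + 1) (hi + 1) h1 (by omega), List.foldl_append]
  exact foldl_hoist a _ _

theorem gA_set_ne (a : List Int) {idx i : Int} (v : Int) (hidx : 0 ≤ idx) (hi : 0 ≤ i)
    (hne : i ≠ idx) : gA (a.set idx.toNat v) i = gA a i := by
  unfold gA
  rw [PySem.List.pyGetD_of_nonneg _ _ hi, PySem.List.pyGetD_of_nonneg _ _ hi]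
  rw [List.getD_eq_getElem?_getD, List.getD_eq_getElem?_getD,
    List.getElem?_set_ne (by omega)]

theorem Lf_set_out (a : List Int) {idx lo hi : Int} (v : Int) (h0 : 0 ≤ lo) (hi0 : 0 ≤ idx)
    (h : idx < lo ∨ hi < idx) : Lf (a.set idx.toNat v) lo hi = Lf a lo hi := by
  unfold Lf
  apply PySem.List.foldl_congr_mem
  intro acc x hx
  rw [PySem.List.mem_pyRange_one] at hx
  rw [gA_set_ne a v hi0 (by omega) (by omega)]

theorem desc_refl (p : Nat) : desc p p := ⟨0, by simp⟩

theorem div_pow_sub (m j k : Nat) (h : j ≤ k) : m / 2 ^ k = (m / 2 ^ j) / 2 ^ (k - j) := by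
  rw [Nat.div_div_eq_div_mul, ← pow_add, Nat.add_sub_cancel' h]

theorem desc_left {p m : Nat} (h : desc (2 * p) m) : desc p m := by
  obtain ⟨k, hk⟩ := h
  exact ⟨k + 1, by rw [pow_succ, ← Nat.div_div_eq_div_mul, hk]; omega⟩

theorem desc_right {p m : Nat} (h : desc (2 * p + 1) m) : desc p m := by
  obtain ⟨k, hk⟩ := h
  exact ⟨k + 1, by rw [pow_succ, ← Nat.div_div_eq_div_mul, hk]; omega⟩

theorem desc_ge {p m : Nat} (h : desc p m) : p ≤ m := by
  obtain ⟨k, hk⟩ := h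
  calc p = m / 2 ^ k := hk.symm
    _ ≤ m := Nat.div_le_self _ _

theorem desc_disjoint {p m : Nat} (hp : 1 ≤ p) (h1 : desc (2 * p) m) (h2 : desc (2 * p + 1) m) :
    False := by
  obtain ⟨j, hj⟩ := h1
  obtain ⟨k, hk⟩ := h2
  rcases lt_trichotomy j k with h | h | h
  · have := div_pow_sub m j k (le_of_lt h)
    rw [hj, hk] at this
    have hle : 2 * p / 2 ^ (k - j) ≤ 2 * p / 2 := by
      apply Nat.div_le_div_left
      · exact (pow_le_pow_right₀ (by norm_num) (by omega) : (2:Nat)^1 ≤ 2^(k-j)) |>.trans_eq' (by norm_num)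
      · norm_num
    omega
  · subst h; omega
  · have := div_pow_sub m k j (le_of_lt h)
    rw [hj, hk] at this
    have hle : (2 * p + 1) / 2 ^ (j - k) ≤ (2 * p + 1) / 2 := by
      apply Nat.div_le_div_left
      · exact (pow_le_pow_right₀ (by norm_num) (by omega) : (2:Nat)^1 ≤ 2^(j-k)) |>.trans_eq' (by norm_num)
      · norm_num
    omega

theorem cov_bounds {n : Nat} {s e : Int} {m : Nat} {s' e' : Int}
    (h : Cov n s e m s' e') (hse : s ≤ e) : s ≤ s' ∧ s' ≤ e' ∧ e' ≤ e := by
  induction h with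
  | refl n s e => exact ⟨le_rfl, hse, le_rfl⟩
  | left h hc ih =>
    have hm := mid_bounds (lt_of_le_of_ne hse h)
    have := ih hm.1
    omega
  | right h hc ih =>
    have hm := mid_bounds (lt_of_le_of_ne hse h)
    have := ih (by omega)
    omega

theorem cov_desc {n : Nat} {s e : Int} {m : Nat} {s' e' : Int} (h : Cov n s e m s' e') : desc n m := by
  induction h with
  | refl n s e => exact desc_refl n
  | left h hc ih => exact desc_left ih
  | right h hc ih => exact desc_right ih

theorem buildA_frame (arr : List Int) (fuel : Nat) (node : Nat) (s e : Int) (seg : Nat → Int)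
    (m : Nat) (h : ¬ desc node m) : buildA arr fuel node s e seg m = seg m := by
  induction fuel generalizing node s e seg with
  | zero => rfl
  | succ fuel ih =>
    have hmn : m ≠ node := fun hh => h (hh ▸ desc_refl m)
    by_cases hse : s = e
    · simp only [buildA, if_pos hse, segSet, if_neg hmn]
    · have hL : ¬ desc (2 * node) m := fun hd => h (desc_left hd)
      have hR : ¬ desc (2 * node + 1) m := fun hd => h (desc_right hd)
      simp only [buildA, if_neg hse, segSet, if_neg hmn]
      rw [ih _ _ _ _ hR, ih _ _ _ _ hL]

theorem updateA_frame (fuel : Nat) (node : Nat) (s e idx val : Int) (seg : Nat → Int)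
    (m : Nat) (h : ¬ desc node m) : updateA fuel node s e idx val seg m = seg m := by
  induction fuel generalizing node s e seg with
  | zero => rfl
  | succ fuel ih =>
    have hmn : m ≠ node := fun hh => h (hh ▸ desc_refl m)
    by_cases hse : s = e
    · simp only [updateA, if_pos hse, segSet, if_neg hmn]
    · have hL : ¬ desc (2 * node) m := fun hd => h (desc_left hd)
      have hR : ¬ desc (2 * node + 1) m := fun hd => h (desc_right hd)
      simp only [updateA, if_neg hse, segSet, if_neg hmn]
      by_cases hi : idx ≤ PySem.Int.floordiv (s + e) 2
      · rw [if_pos hi, ih _ _ _ _ hL]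
      · rw [if_neg hi, ih _ _ _ _ hR]

theorem build_spec (arr : List Int) (fuel : Nat) (node : Nat) (s e : Int) (seg : Nat → Int)
    (hn : 1 ≤ node) (hs : 0 ≤ s) (hse : s ≤ e) (hf : (e - s).toNat < fuel) :
    ∀ m s' e', Cov node s e m s' e' → buildA arr fuel node s e seg m = Lf arr s' e' := by
  induction fuel generalizing node s e seg with
  | zero => omega
  | succ fuel ih =>
    intro m s' e' hcov
    by_cases hse' : s = e
    · subst hse'
      cases hcov with
      | refl =>
        simp [buildA, segSet]
        rw [Lf_single]
        rfl
      | left h hc => exact absurd rfl h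
      | right h hc => exact absurd rfl h
    · have hslt : s < e := lt_of_le_of_ne hse hse'
      obtain ⟨hm1, hm2⟩ := mid_bounds hslt
      have hdisj : ¬ desc (2 * node + 1) (2 * node) :=
        fun hd => desc_disjoint hn (desc_refl _) hd
      cases hcov with
      | refl =>
        simp only [buildA, if_neg hse', segSet, if_true]
        rw [buildA_frame arr fuel _ _ _ _ _ hdisj]
        rw [ih (2 * node) s _ seg (by omega) hs hm1 (by omega) _ _ _ (Cov.refl _ _ _)]
        rw [ih (2 * node + 1) _ e _ (by omega) (by omega) (by omega) (by omega) _ _ _ (Cov.refl _ _ _)]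
        exact (Lf_split arr (by omega) (by omega)).symm
      | left h hc =>
        have hdm : desc (2 * node) m := cov_desc hc
        have hmn : m ≠ node := by have := desc_ge hdm; omega
        simp only [buildA, if_neg hse', segSet, if_neg hmn]
        rw [buildA_frame arr fuel _ _ _ _ _ (fun hd => desc_disjoint hn hdm hd)]
        exact ih (2 * node) s _ seg (by omega) hs hm1 (by omega) _ _ _ hc
      | right h hc =>
        have hdm : desc (2 * node + 1) m := cov_desc hc
        have hmn : m ≠ node := by have := desc_ge hdm; omega
        simp only [buildA, if_neg hse', segSet, if_neg hmn]
        exact ih (2 * node + 1) _ e _ (by omega) (by omega) (by omega) (by omega) _ _ _ hc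

theorem update_spec (a : List Int) (fuel : Nat) (node : Nat) (s e idx val : Int) (seg : Nat → Int)
    (hn : 1 ≤ node) (hs : 0 ≤ s) (hse : s ≤ e) (hf : (e - s).toNat < fuel)
    (hi1 : s ≤ idx) (hi2 : idx ≤ e) (hlen : e < (a.length : Int))
    (H : ∀ m s' e', Cov node s e m s' e' → seg m = Lf a s' e') :
    ∀ m s' e', Cov node s e m s' e' →
      updateA fuel node s e idx val seg m = Lf (a.set idx.toNat val) s' e' := by
  induction fuel generalizing node s e seg with
  | zero => omega
  | succ fuel ih =>
    intro m s' e' hcov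
    by_cases hse' : s = e
    · subst hse'
      have hidx : idx = s := le_antisymm hi2 hi1
      cases hcov with
      | refl =>
        simp [updateA, segSet]
        subst hidx
        rw [Lf_single]
        unfold gA
        rw [PySem.List.pyGetD_of_nonneg _ _ hs, List.getD_eq_getElem?_getD,
          List.getElem?_set_self (by omega)]
        rfl
      | left h hc => exact absurd rfl h
      | right h hc => exact absurd rfl h
    · have hslt : s < e := lt_of_le_of_ne hse hse'
      obtain ⟨hm1, hm2⟩ := mid_bounds hslt
      have hdisjL : ¬ desc (2 * node + 1) (2 * node) :=
        fun hd => desc_disjoint hn (desc_refl _) hd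
      have hdisjR : ¬ desc (2 * node) (2 * node + 1) :=
        fun hd => desc_disjoint hn hd (desc_refl _)
      have HL : ∀ m s' e', Cov (2 * node) s (PySem.Int.floordiv (s + e) 2) m s' e' →
          seg m = Lf a s' e' := fun m s' e' hc => H m s' e' (Cov.left hse' hc)
      have HR : ∀ m s' e', Cov (2 * node + 1) (PySem.Int.floordiv (s + e) 2 + 1) e m s' e' →
          seg m = Lf a s' e' := fun m s' e' hc => H m s' e' (Cov.right hse' hc)
      by_cases hil : idx ≤ PySem.Int.floordiv (s + e) 2
      · -- recurse left
        have hspecL := ih (2 * node) s _ seg (by omega) hs hm1 (by omega) hi1 hil (by omega) HL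
        cases hcov with
        | refl =>
          simp only [updateA, if_neg hse', if_pos hil, segSet, if_true]
          rw [updateA_frame fuel _ _ _ _ _ _ _ hdisjR,
            HR _ _ _ (Cov.refl _ _ _),
            hspecL _ _ _ (Cov.refl _ _ _),
            ← Lf_set_out a (idx := idx) (lo := PySem.Int.floordiv (s + e) 2 + 1) (hi := e) val
              (by omega) (by omega) (Or.inl (by omega))]
          exact (Lf_split _ (by omega) (by omega)).symm
        | left h hc =>
          have hdm : desc (2 * node) m := cov_desc hc
          have hmn : m ≠ node := by have := desc_ge hdm; omega
          simp only [updateA, if_neg hse', if_pos hil, segSet, if_neg hmn]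
          exact hspecL _ _ _ hc
        | right h hc =>
          have hdm : desc (2 * node + 1) m := cov_desc hc
          have hmn : m ≠ node := by have := desc_ge hdm; omega
          have hb := cov_bounds hc (by omega)
          simp only [updateA, if_neg hse', if_pos hil, segSet, if_neg hmn]
          rw [updateA_frame fuel _ _ _ _ _ _ _ (fun hd => desc_disjoint hn hd hdm),
            HR _ _ _ hc,
            Lf_set_out a (idx := idx) (lo := s') (hi := e') val
              (by omega) (by omega) (Or.inl (by omega))]
      · -- recurse right
        have hspecR := ih (2 * node + 1) _ e seg (by omega) (by omega) (by omega) (by omega)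
          (by omega) hi2 hlen HR
        cases hcov with
        | refl =>
          simp only [updateA, if_neg hse', if_neg hil, segSet, if_true]
          rw [updateA_frame fuel _ _ _ _ _ _ _ hdisjL,
            HL _ _ _ (Cov.refl _ _ _),
            hspecR _ _ _ (Cov.refl _ _ _),
            ← Lf_set_out a (idx := idx) (lo := s) (hi := PySem.Int.floordiv (s + e) 2) val
              (by omega) (by omega) (Or.inr (by omega))]
          exact (Lf_split _ (by omega) (by omega)).symm
        | left h hc =>
          have hdm : desc (2 * node) m := cov_desc hc
          have hmn : m ≠ node := by have := desc_ge hdm; omega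
          have hb := cov_bounds hc hm1
          simp only [updateA, if_neg hse', if_neg hil, segSet, if_neg hmn]
          rw [updateA_frame fuel _ _ _ _ _ _ _ (fun hd => desc_disjoint hn hdm hd),
            HL _ _ _ hc,
            Lf_set_out a (idx := idx) (lo := s') (hi := e') val
              (by omega) (by omega) (Or.inr (by omega))]
        | right h hc =>
          have hdm : desc (2 * node + 1) m := cov_desc hc
          have hmn : m ≠ node := by have := desc_ge hdm; omega
          simp only [updateA, if_neg hse', if_neg hil, segSet, if_neg hmn]
          exact hspecR _ _ _ hc

theorem query_spec (a : List Int) (fuel : Nat) (node : Nat) (s e l r : Int) (seg : Nat → Int)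
    (hn : 1 ≤ node) (hs : 0 ≤ s) (hse : s ≤ e) (hf : (e - s).toNat < fuel)
    (H : ∀ m s' e', Cov node s e m s' e' → seg m = Lf a s' e') :
    queryA fuel node s e l r seg = Lf a (max l s) (min r e) := by
  induction fuel generalizing node s e seg with
  | zero => omega
  | succ fuel ih =>
    by_cases hout : r < s ∨ e < l
    · simp only [queryA, if_pos hout]
      exact (Lf_empty a (by omega)).symm
    · by_cases hin : l ≤ s ∧ e ≤ r
      · simp only [queryA, if_neg hout, if_pos hin]
        rw [H _ _ _ (Cov.refl _ _ _)]
        congr 1 <;> omega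
      · have hse' : s ≠ e := by
          intro hh
          subst hh
          omega
        have hslt : s < e := lt_of_le_of_ne hse hse'
        obtain ⟨hm1, hm2⟩ := mid_bounds hslt
        simp only [queryA, if_neg hout, if_neg hin]
        rw [ih (2 * node) s _ seg (by omega) hs hm1 (by omega)
            (fun m s' e' hc => H m s' e' (Cov.left hse' hc)),
          ih (2 * node + 1) _ e seg (by omega) (by omega) (by omega) (by omega)
            (fun m s' e' hc => H m s' e' (Cov.right hse' hc))]
        set mid := PySem.Int.floordiv (s + e) 2 with hmid
        by_cases hc1 : min r e ≤ mid
        · rw [Lf_empty a (lo := max l (mid + 1)) (by omega),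
            pylcm_one_right]
          congr 1 ; omega
        · by_cases hc2 : mid + 1 ≤ max l s
          · rw [Lf_empty a (hi := min r mid) (by omega), pylcm_one_left]
            congr 1 ; omega
          · rw [show min r mid = mid by omega, show max l (mid + 1) = mid + 1 by omega]
            exact (Lf_split a (by omega) (by omega)).symm

theorem loop_spec (arr : List Int) (queries : List (List Int)) (a : List Int) (seg : Nat → Int)
    (ans : List Int) (hne : arr ≠ [])
    (hlen : a.length = arr.length)
    (hq : ∀ q ∈ queries, q.length = 3 ∧
      (PySem.List.pyGetD q 0 0 = 1 →
        0 ≤ PySem.List.pyGetD q 1 0 ∧ PySem.List.pyGetD q 1 0 < (arr.length : Int)))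
    (H : ∀ m s' e', Cov 1 0 ((arr.length : Int) - 1) m s' e' → seg m = Lf a s' e') :
    (queries.foldl
      (fun st q =>
        if PySem.List.pyGetD q 0 0 = 1 then
          (updateA (arr.length + 1) 1 0 ((arr.length : Int) - 1)
            (PySem.List.pyGetD q 1 0) (PySem.List.pyGetD q 2 0) st.1, st.2)
        else
          (st.1, st.2 ++ [queryA (arr.length + 1) 1 0 ((arr.length : Int) - 1)
            (PySem.List.pyGetD q 1 0) (PySem.List.pyGetD q 2 0) st.1]))
      (seg, ans)).2 =
    (queries.foldl
      (fun (st : List Int × List Int) q =>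
        let t := PySem.List.pyGetD q 0 0
        let x := PySem.List.pyGetD q 1 0
        let y := PySem.List.pyGetD q 2 0
        if t = 1 then (st.1.set x.toNat y, st.2)
        else
          (st.1, st.2 ++
            [(PySem.List.pyRange (max x 0) (min y ((arr.length : Int) - 1) + 1) 1).foldl
              (fun acc i =>
                PySem.Int.floordiv (acc * PySem.List.pyGetD st.1 i 0)
                  (Int.gcd acc (PySem.List.pyGetD st.1 i 0))) 1]))
      (a, ans)).2 := by
  induction queries generalizing a seg ans with
  | nil => rfl
  | cons q qs ih =>
    have hq3 := (hq q (List.mem_cons_self)).1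
    have hqi := (hq q (List.mem_cons_self)).2
    have hq' := fun p hp => hq p (List.mem_cons_of_mem q hp)
    have h1 : 1 ≤ arr.length := List.length_pos_iff.mpr hne
    simp only [List.foldl_cons]
    by_cases ht : PySem.List.pyGetD q 0 0 = 1
    · simp only [if_pos ht]
      exact ih (a.set (PySem.List.pyGetD q 1 0).toNat (PySem.List.pyGetD q 2 0)) _ ans
        (by rw [List.length_set]; exact hlen)
        hq'
        (update_spec a (arr.length + 1) 1 0 ((arr.length : Int) - 1)
          (PySem.List.pyGetD q 1 0) (PySem.List.pyGetD q 2 0) seg le_rfl le_rfl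
          (by omega) (by omega) (hqi ht).1 (by have := (hqi ht).2; omega)
          (by omega) H)
    · simp only [if_neg ht]
      have hval : queryA (arr.length + 1) 1 0 ((arr.length : Int) - 1)
          (PySem.List.pyGetD q 1 0) (PySem.List.pyGetD q 2 0) seg =
          Lf a (max (PySem.List.pyGetD q 1 0) 0)
            (min (PySem.List.pyGetD q 2 0) ((arr.length : Int) - 1)) := by
        have := query_spec a (arr.length + 1) 1 0 ((arr.length : Int) - 1)
          (PySem.List.pyGetD q 1 0) (PySem.List.pyGetD q 2 0) seg le_rfl le_rfl
          (by omega) (by omega) H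
        simpa using this
      rw [hval]
      have hB : (PySem.List.pyRange (max (PySem.List.pyGetD q 1 0) 0)
            (min (PySem.List.pyGetD q 2 0) ((arr.length : Int) - 1) + 1) 1).foldl
          (fun acc i =>
            PySem.Int.floordiv (acc * PySem.List.pyGetD a i 0)
              (Int.gcd acc (PySem.List.pyGetD a i 0))) 1 =
          Lf a (max (PySem.List.pyGetD q 1 0) 0)
            (min (PySem.List.pyGetD q 2 0) ((arr.length : Int) - 1)) := rfl
      rw [hB]
      exact ih a seg _ hlen hq' H

-- ===== VERDICT (by name: the statement is the Claim_ definition above) =====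
theorem RangeLCMQuery_spec : Claim_equal_RangeLCMQuery := by
  intro arr queries _ hpre
  obtain ⟨hne, hq, -⟩ := hpre
  unfold Spec_RangeLCMQuery
  show RangeLCMQuery arr queries = RangeLCMQuery_alt arr queries
  simp only [RangeLCMQuery, RangeLCMQuery_alt]
  have hlen : 1 ≤ arr.length := by
    cases arr with
    | nil => exact absurd rfl hne
    | cons x xs => simp
  exact (loop_spec arr queries arr
    (buildA arr (arr.length + 1) 1 0 ((arr.length : Int) - 1) (fun _ => 1)) [] hne rfl hq
    (build_spec arr (arr.length + 1) 1 0 ((arr.length : Int) - 1) (fun _ => 1) le_rfl le_rfl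
      (by omega) (by omega)))
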